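-- pv_equiv track=rewrite | github.com/JuanPNG/biodiversity_annotations_dashboard | utils/data_tools.py | resolve_preset_columns
-- ===== SOURCE A (Python) =====
-- from typing import Iterable, Mapping, Sequence
--
-- def resolve_preset_columns(
--         all_columns: list[str],
--         patterns: Iterable[str]
-- ) -> list[str]:
--     """
--     Given a list of columns and simple wildcard patterns (suffix '*'),
--     return columns in the order they appear in `all_columns`.
--     """
--     pats = list(patterns or [])
--     resolved: list[str] = []
--     seen = set()
--
--     def matches(col: str, pat: str) -> bool:
--         return col.startswith(pat[:-1]) if pat.endswith("*") else (col == pat)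
--
--     for col in all_columns:
--         for pat in pats:
--             if matches(col, pat) and col not in seen:
--                 seen.add(col)
--                 resolved.append(col)
--                 break
--     return resolved
-- ===== SOURCE B (Python) =====
-- def resolve_preset_columns(all_columns, patterns):
--     """Pattern-major: build the set of matched column names in one staged pass
--     over the patterns, then restore column order with an ordered dedup filter."""
--     matched = set()
--     for pat in (patterns or []):
--         if pat.endswith("*"):
--             pre = pat[:-1]
--             matched.update(c for c in all_columns if c.startswith(pre))
--         else:
--             matched.add(pat)
--     return list(dict.fromkeys(c for c in all_columns if c in matched))
-- ===== Notes on version B (the rewrite author's own statement) =====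
-- stated objective: faster
-- what changed: B inverts the loop nesting: instead of A's column-major scan that rescans every pattern per column, B makes one pattern-major pass building the set of matched column names (exact patterns added directly, each wildcard prefix scanned once over the columns), then restores column order with a single ordered-dedup membership filter, so exact patterns cost O(1) per column instead of a rescan.
import Mathlib
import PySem

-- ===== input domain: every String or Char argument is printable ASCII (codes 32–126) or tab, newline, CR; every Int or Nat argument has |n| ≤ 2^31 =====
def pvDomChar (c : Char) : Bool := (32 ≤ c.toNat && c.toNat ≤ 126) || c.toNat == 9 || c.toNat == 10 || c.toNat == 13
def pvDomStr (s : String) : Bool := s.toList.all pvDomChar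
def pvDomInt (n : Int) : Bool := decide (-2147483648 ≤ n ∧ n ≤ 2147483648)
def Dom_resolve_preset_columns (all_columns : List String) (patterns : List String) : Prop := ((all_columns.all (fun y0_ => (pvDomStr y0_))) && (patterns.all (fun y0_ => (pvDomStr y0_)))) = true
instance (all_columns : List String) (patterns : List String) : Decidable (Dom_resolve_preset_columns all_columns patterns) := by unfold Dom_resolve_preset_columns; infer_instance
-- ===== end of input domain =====

-- B inverts the loop nesting: a pattern-major pass builds the set of matched
-- column names, then an ordered-dedup filter over the columns restores column
-- order (objective: faster — exact patterns become one set lookup per column).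

-- ===== PORT A =====
-- helper 'matches' of A
def pvMatchesA (col pat : String) : Bool :=
  if PySem.Str.endswith pat "*" then
    PySem.Str.startswith col (PySem.Str.slice pat none (some (-1)))
  else
    col == pat

-- the inner 'for pat in pats: … break' loop of A, over one column
def pvInnerA (col : String) (pats : List String)
    (resolved : List String) (seen : PySem.Set String) : List String × PySem.Set String :=
  match pats with
  | [] => (resolved, seen)
  | pat :: rest =>
      if pvMatchesA col pat && !(PySem.Set.contains seen col) then
        (resolved ++ [col], PySem.Set.add seen col)
      else
        pvInnerA col rest resolved seen

def resolve_preset_columns (all_columns : List String) (patterns : List String) : List String :=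
  (all_columns.foldl (fun st col => pvInnerA col patterns st.1 st.2)
    ([], PySem.Set.empty)).1

-- ===== PORT B =====
-- first stage of B: 'matched' after the pattern-major loop
def pvMatchedB (all_columns : List String) (patterns : List String) : PySem.Set String :=
  patterns.foldl
    (fun m pat =>
      if PySem.Str.endswith pat "*" then
        -- matched.update(c for c in all_columns if c.startswith(pre))
        PySem.Set.update m
          (all_columns.filter
            (fun c => PySem.Str.startswith c (PySem.Str.slice pat none (some (-1)))))
      else
        PySem.Set.add m pat)
    PySem.Set.empty

def resolve_preset_columns_alt (all_columns : List String) (patterns : List String) : List String :=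
  let matched := pvMatchedB all_columns patterns
  PySem.List.dedup (all_columns.filter (fun c => PySem.Set.contains matched c))

-- ===== PRECONDITION & SPEC =====
def Spec_resolve_preset_columns (all_columns : List String) (patterns : List String) (out : List String) : Prop := out = resolve_preset_columns_alt all_columns patterns
instance (all_columns : List String) (patterns : List String) (out : List String) : Decidable (Spec_resolve_preset_columns all_columns patterns out) := by unfold Spec_resolve_preset_columns; infer_instance

-- ===== CLAIM (what is proved, stated in full; the proofs are below) =====
def Claim_equal_resolve_preset_columns : Prop := ∀ (all_columns : List String) (patterns : List String), Dom_resolve_preset_columns all_columns patterns → Spec_resolve_preset_columns all_columns patterns (resolve_preset_columns all_columns patterns)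

-- ===== LEMMAS AND PROOFS =====

-- A's inner loop appends col iff some pattern matches and col is unseen
theorem pvInnerA_eq (col : String) (pats : List String)
    (resolved : List String) (seen : PySem.Set String) :
    pvInnerA col pats resolved seen =
      if pats.any (fun pat => pvMatchesA col pat) && !(PySem.Set.contains seen col) then
        (resolved ++ [col], PySem.Set.add seen col)
      else
        (resolved, seen) := by
  induction pats with
  | nil => simp [pvInnerA]
  | cons p rest ih =>
      simp only [pvInnerA, List.any_cons, ih]
      by_cases hm : pvMatchesA col p <;> by_cases hs : col ∈ seen <;>
        simp [hm, hs, PySem.Set.contains]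

-- membership in B's 'matched' set, for a column of all_columns, is 'some pattern matches'
theorem pvMatchedB_mem (all_columns : List String) (pats : List String)
    (m : PySem.Set String) (c : String) (hc : c ∈ all_columns) :
    PySem.Set.contains
      (pats.foldl
        (fun m pat =>
          if PySem.Str.endswith pat "*" then
            PySem.Set.update m
              (all_columns.filter
                (fun c => PySem.Str.startswith c (PySem.Str.slice pat none (some (-1)))))
          else
            PySem.Set.add m pat)
        m) c
    = (PySem.Set.contains m c || pats.any (fun pat => pvMatchesA c pat)) := by
  induction pats generalizing m with
  | nil => simp
  | cons p rest ih =>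
      simp only [List.foldl_cons, List.any_cons, ih]
      by_cases hw : PySem.Str.endswith p "*"
      · have hw' : PySem.Chars.endswith p.toList ['*'] = true := by simpa using hw
        rw [if_pos hw, Bool.eq_iff_iff]
        simp [pvMatchesA, hw', PySem.Set.contains, PySem.Set.mem_update, hc]
        tauto
      · have hw' : ¬ PySem.Chars.endswith p.toList ['*'] = true := by simpa using hw
        rw [if_neg hw, Bool.eq_iff_iff]
        simp [pvMatchesA, hw', PySem.Set.contains, PySem.Set.mem_add]
        tauto

-- A's fold, started on a diagonal state, is a single-list fold
theorem pvA_fold_diag (all_columns : List String) (patterns : List String)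
    (r : List String) :
    (all_columns.foldl (fun st col => pvInnerA col patterns st.1 st.2) (r, r)).1
    = all_columns.foldl
        (fun r col =>
          if patterns.any (fun pat => pvMatchesA col pat) then PySem.Set.add r col else r)
        r := by
  induction all_columns generalizing r with
  | nil => rfl
  | cons c rest ih =>
      rw [List.foldl_cons, List.foldl_cons, pvInnerA_eq]
      by_cases hm : patterns.any (fun pat => pvMatchesA c pat)
      · by_cases hs : c ∈ r
        · have ha : PySem.Set.add r c = r := by simp [PySem.Set.add, PySem.Set.contains, hs]
          rw [if_neg (by simp [PySem.Set.contains, hs]), if_pos hm, ha]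
          exact ih r
        · have ha : PySem.Set.add r c = r ++ [c] := by simp [PySem.Set.add, PySem.Set.contains, hs]
          rw [if_pos (by simp [hm, PySem.Set.contains, hs]), if_pos hm, ha]
          exact ih (r ++ [c])
      · rw [if_neg (by simp [hm]), if_neg hm]
        exact ih r

-- ===== VERDICT (by name: the statement is the Claim_ definition above) =====
theorem resolve_preset_columns_spec : Claim_equal_resolve_preset_columns := by
  intro all_columns patterns _
  unfold Spec_resolve_preset_columns resolve_preset_columns resolve_preset_columns_alt
  show (List.foldl (fun st col => pvInnerA col patterns st.1 st.2)
          (([] : List String), ([] : List String)) all_columns).1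
      = PySem.List.dedup
          (List.filter (fun c => (pvMatchedB all_columns patterns).contains c) all_columns)
  rw [pvA_fold_diag all_columns patterns []]
  rw [PySem.List.dedup_eq_ofList, PySem.Set.ofList_eq_foldl, List.foldl_filter]
  apply PySem.List.foldl_congr_mem
  intro acc c hc
  unfold pvMatchedB
  rw [pvMatchedB_mem all_columns patterns PySem.Set.empty c hc]
  simp [PySem.Set.empty, PySem.Set.contains]
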